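-- pv_equiv track=rewrite | github.com/UNStats/fis4sdg_2020 | utils.py | year_intervals
-- ===== SOURCE A (Python) =====
-- def year_intervals(years_list):
--     """ Find the coverage of an ordered list of years"""
--
--     years_list = list(map(int, years_list))
--
--     years_list.sort()
--
--     n = len(years_list)
--
--     start_y = list()
--     end_y = list()
--
--     start_y.append(years_list[0])
--
--     if n > 1:
--         for i in range(n-1):
--             if(years_list[i+1] - years_list[i] > 1):
--                 start_y.append(years_list[i+1])
--                 end_y.append(years_list[i])
--
--     end_y.append(years_list[n-1])
--
--     interval_yy = list()
--
--     for i in range(len(start_y)):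
--
--         if end_y[i] - start_y[i] > 0:
--             interval_yy.append(str(start_y[i]) + '-' + str(end_y[i]))
--         else:
--             interval_yy.append(str(start_y[i]))
--
--     x = ",".join(interval_yy)
--     return(x)
-- ===== SOURCE B (Python) =====
-- def year_intervals(years_list):
--     """ Find the coverage of an ordered list of years"""
--     # Group each year by the arithmetic key year - rank: within a maximal run of
--     # consecutive years the key is constant, and across a gap it strictly grows,
--     # so a dict keyed by it collects exactly the coverage intervals in order.
--     runs = {}
--     for i, y in enumerate(sorted(set(map(int, years_list)))):
--         runs.setdefault(y - i, [y, y])[1] = y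
--     return ",".join(str(a) if a == b else str(a) + '-' + str(b)
--                     for a, b in runs.values())
-- ===== Notes on version B (the rewrite author's own statement) =====
-- stated objective: alternative
-- what changed: Replaces the explicit gap-test boundary arrays (start_y/end_y built by comparing adjacent sorted elements, then a second index loop zipping them into strings) with hash-grouping: each year is bucketed in an insertion-ordered dict under the arithmetic key year - rank, which is constant exactly on a maximal run of consecutive years, so the dict's values are the intervals with no neighbour comparison at all.
import Mathlib
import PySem

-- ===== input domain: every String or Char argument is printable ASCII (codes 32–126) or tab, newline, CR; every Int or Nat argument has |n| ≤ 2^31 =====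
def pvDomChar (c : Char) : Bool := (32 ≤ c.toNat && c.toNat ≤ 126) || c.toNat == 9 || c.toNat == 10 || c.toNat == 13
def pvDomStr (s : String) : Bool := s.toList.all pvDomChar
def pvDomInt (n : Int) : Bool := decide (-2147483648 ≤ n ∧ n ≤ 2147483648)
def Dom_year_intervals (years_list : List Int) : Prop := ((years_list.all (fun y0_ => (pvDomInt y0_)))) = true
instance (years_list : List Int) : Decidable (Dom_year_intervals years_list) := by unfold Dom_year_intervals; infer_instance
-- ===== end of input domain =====

-- B replaces A's adjacent-gap boundary arrays by hash-grouping under the key year - rank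
-- (objective: alternative algorithm; equivalence of the RETURN value).

-- ===== PORT A =====
def year_intervals (years_list : List Int) : String :=
  let ysl := PySem.List.sorted (years_list.map (fun y => y)) (fun x => x) false
  let n : Int := ysl.length
  -- years_list[0] : IndexError on the empty list, excluded by Pre_
  let start_y : List Int := [PySem.List.pyGetD ysl 0 0]
  let se :=
    if n > 1 then
      (PySem.List.pyRange 0 (n - 1) 1).foldl
        (fun (se : List Int × List Int) i =>
          if PySem.List.pyGetD ysl (i + 1) 0 - PySem.List.pyGetD ysl i 0 > 1 then
            (se.1 ++ [PySem.List.pyGetD ysl (i + 1) 0], se.2 ++ [PySem.List.pyGetD ysl i 0])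
          else se)
        (start_y, ([] : List Int))
    else (start_y, ([] : List Int))
  let end_y := se.2 ++ [PySem.List.pyGetD ysl (n - 1) 0]
  let interval_yy :=
    (PySem.List.pyRange 0 (se.1.length : Int) 1).foldl
      (fun acc i =>
        acc ++ [if PySem.List.pyGetD end_y i 0 - PySem.List.pyGetD se.1 i 0 > 0 then
                  PySem.Int.toStr (PySem.List.pyGetD se.1 i 0) ++ "-" ++ PySem.Int.toStr (PySem.List.pyGetD end_y i 0)
                else PySem.Int.toStr (PySem.List.pyGetD se.1 i 0)])
      ([] : List String)
  PySem.Str.join "," interval_yy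

-- ===== PORT B =====
-- runs.setdefault(y - i, [y, y])[1] = y  : if the key is present, overwrite the pair's
-- second component (position kept); otherwise insert [y, y] (the mutation is then a no-op).
def yiStep (runs : PySem.Dict Int (Int × Int)) (p : Int × Int) : PySem.Dict Int (Int × Int) :=
  match PySem.Dict.get? runs (p.2 - p.1) with
  | some ab => PySem.Dict.insert runs (p.2 - p.1) (ab.1, p.2)
  | none => PySem.Dict.insert runs (p.2 - p.1) (p.2, p.2)

def year_intervals_alt (years_list : List Int) : String :=
  let ys := PySem.List.sorted (PySem.Set.ofList (years_list.map (fun y => y))) (fun x => x) false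
  let runs := (PySem.List.enumerate ys 0).foldl yiStep PySem.Dict.empty
  PySem.Str.join ","
    ((PySem.Dict.values runs).map
      (fun ab => if ab.1 == ab.2 then PySem.Int.toStr ab.1
                 else PySem.Int.toStr ab.1 ++ "-" ++ PySem.Int.toStr ab.2))

-- ===== PRECONDITION & SPEC =====
-- Pre_ excludes only the empty list, on which A raises IndexError.
def Pre_year_intervals (years_list : List Int) : Prop := years_list ≠ []
instance (years_list : List Int) : Decidable (Pre_year_intervals years_list) := by
  unfold Pre_year_intervals; infer_instance
def pvWitness_year_intervals : List Int := ([2000, 2001, 2003])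

def Spec_year_intervals (years_list : List Int) (out : String) : Prop := out = year_intervals_alt years_list
instance (years_list : List Int) (out : String) : Decidable (Spec_year_intervals years_list out) := by
  unfold Spec_year_intervals; infer_instance

-- ===== CLAIM (what is proved, stated in full; the proofs are below) =====
def Claim_equal_year_intervals : Prop := ∀ (years_list : List Int), Dom_year_intervals years_list → Pre_year_intervals years_list → Spec_year_intervals years_list (year_intervals years_list)
-- ===== LEMMAS AND PROOFS =====

-- interval formatter shared by the canonical forms below
def yiFmt (start stop : Int) : String :=
  if start == stop then PySem.Int.toStr start else PySem.Int.toStr start ++ "-" ++ PySem.Int.toStr stop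

-- canonical run-splitting functions used only by the proofs
def ivs (s p : Int) : List Int → List String
  | [] => [yiFmt s p]
  | y :: t => if y - p > 1 then yiFmt s p :: ivs y y t else ivs s y t

def bIvs (s p : Int) : List Int → List String
  | [] => [yiFmt s p]
  | y :: t => if y = p + 1 then bIvs s y t else yiFmt s p :: bIvs y y t

def runsOf (s p : Int) : List Int → List (Int × Int)
  | [] => [(s, p)]
  | y :: t => if y = p + 1 then runsOf s y t else (s, p) :: runsOf y y t

-- destutter of a sorted list (drop elements equal to the previous one)
def dsL (p : Int) : List Int → List Int
  | [] => []
  | y :: t => if y = p then dsL p t else y :: dsL y t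

def fmtA (p : Int × Int) : String :=
  if p.2 - p.1 > 0 then PySem.Int.toStr p.1 ++ "-" ++ PySem.Int.toStr p.2 else PySem.Int.toStr p.1

def astep (se : List Int × List Int) (p : Int × Int) : List Int × List Int :=
  if p.2 - p.1 > 1 then (se.1 ++ [p.2], se.2 ++ [p.1]) else se

lemma pyGetD_cons_succ (a : Int) (l : List Int) (i d : Int) (h : 0 ≤ i) :
    PySem.List.pyGetD (a :: l) (i + 1) d = PySem.List.pyGetD l i d := by
  obtain ⟨k, rfl⟩ := Int.eq_ofNat_of_zero_le h
  have hk : (k : Int) + 1 = ((k + 1 : Nat) : Int) := by push_cast; ring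
  rw [hk, PySem.List.pyGetD_natCast, PySem.List.pyGetD_natCast]
  simp

lemma pyRange_shift (m : Int) :
    PySem.List.pyRange 1 (m + 1) 1 = (PySem.List.pyRange 0 m 1).map (· + 1) := by
  rw [PySem.List.pyRange_one, PySem.List.pyRange_one]
  simp [List.map_map]
  ring_nf
  intros; trivial

lemma adjFold {σ : Type} (g : σ → Int → Int → σ) (d : Int) :
    ∀ (l : List Int) (init : σ),
      (PySem.List.pyRange 0 ((l.length : Int) - 1) 1).foldl
          (fun st i => g st (PySem.List.pyGetD l i d) (PySem.List.pyGetD l (i + 1) d)) init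
        = (l.zip l.tail).foldl (fun st p => g st p.1 p.2) init
  | [], init => by simp [PySem.List.pyRange_one_eq_nil]
  | [x], init => by simp [PySem.List.pyRange_one_eq_nil]
  | x :: y :: t, init => by
    have hlen : (((x :: y :: t).length : Int)) - 1 = ((t.length : Int) + 1) := by
      simp
    rw [hlen, PySem.List.pyRange_one_cons (by omega)]
    simp only [zero_add]
    rw [pyRange_shift, List.foldl_cons, List.foldl_map]
    have h0 : PySem.List.pyGetD (x :: y :: t) 0 d = x := by
      simpa using PySem.List.pyGetD_natCast (x :: y :: t) 0 d
    have h1 : PySem.List.pyGetD (x :: y :: t) (0 + 1) d = y := by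
      have := pyGetD_cons_succ x (y :: t) 0 d le_rfl
      rw [this]
      simpa using PySem.List.pyGetD_natCast (y :: t) 0 d
    rw [h0, h1]
    have hcong := PySem.List.foldl_congr_mem (PySem.List.pyRange 0 (t.length : Int) 1)
      (fun st i => g st (PySem.List.pyGetD (x :: y :: t) (i + 1) d) (PySem.List.pyGetD (x :: y :: t) (i + 1 + 1) d))
      (fun st i => g st (PySem.List.pyGetD (y :: t) i d) (PySem.List.pyGetD (y :: t) (i + 1) d))
      (g init x y) ?_
    · rw [hcong]
      have := adjFold g d (y :: t) (g init x y)
      have hl2 : (((y :: t).length : Int)) - 1 = (t.length : Int) := by simp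
      rw [hl2] at this
      rw [this]
      simp
    · intro acc i hi
      have hi0 : 0 ≤ i := by
        rw [PySem.List.mem_pyRange_one] at hi
        omega
      simp only [pyGetD_cons_succ x (y :: t) i d hi0,
        pyGetD_cons_succ x (y :: t) (i + 1) d (by omega : (0:Int) ≤ i + 1)]

lemma zipFoldMap (g : Int → Int → String) (d : Int) :
    ∀ (S E : List Int) (acc : List String), S.length = E.length →
      (PySem.List.pyRange 0 (S.length : Int) 1).foldl
          (fun acc i => acc ++ [g (PySem.List.pyGetD S i d) (PySem.List.pyGetD E i d)]) acc
        = acc ++ (S.zip E).map (fun p => g p.1 p.2)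
  | [], E, acc, h => by simp [PySem.List.pyRange_one_eq_nil]
  | a :: S, [], acc, h => by simp at h
  | a :: S, b :: E, acc, h => by
    have hlen : (((a :: S).length : Int)) = ((S.length : Int) + 1) := by simp
    rw [hlen, PySem.List.pyRange_one_cons (by omega)]
    simp only [zero_add]
    rw [pyRange_shift, List.foldl_cons, List.foldl_map]
    have h0 : ∀ (u : Int) (U : List Int), PySem.List.pyGetD (u :: U) 0 d = u := by
      intro u U; simpa using PySem.List.pyGetD_natCast (u :: U) 0 d
    rw [h0, h0]
    have hcong := PySem.List.foldl_congr_mem (PySem.List.pyRange 0 (S.length : Int) 1)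
      (fun acc i => acc ++ [g (PySem.List.pyGetD (a :: S) (i + 1) d) (PySem.List.pyGetD (b :: E) (i + 1) d)])
      (fun acc i => acc ++ [g (PySem.List.pyGetD S i d) (PySem.List.pyGetD E i d)])
      (acc ++ [g a b]) ?_
    · rw [hcong, zipFoldMap g d S E (acc ++ [g a b]) (by simpa using h)]
      simp
    · intro acc i hi
      have hi0 : 0 ≤ i := by
        rw [PySem.List.mem_pyRange_one] at hi
        omega
      simp only [pyGetD_cons_succ a S i d hi0, pyGetD_cons_succ b E i d hi0]

lemma fmtA_eq_yiFmt (s e : Int) (h : s ≤ e) : fmtA (s, e) = yiFmt s e := by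
  unfold fmtA yiFmt
  rcases eq_or_lt_of_le h with rfl | hlt
  · simp
  · rw [if_pos (by omega), if_neg (by simpa using hlt.ne)]

lemma apH : ∀ (t : List Int) (x s : Int) (S E : List Int), S.length = E.length → s ≤ x →
    (x :: t).Pairwise (· ≤ ·) →
    (((((x :: t).zip t).foldl astep (S ++ [s], E)).1.zip
        ((((x :: t).zip t).foldl astep (S ++ [s], E)).2 ++ [(x :: t).getLast (List.cons_ne_nil _ _)])).map fmtA)
      = (S.zip E).map fmtA ++ ivs s x t
  | [], x, s, S, E, hlen, hsx, _ => by
    simp only [List.zip_nil_right, List.foldl_nil, List.getLast_singleton]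
    rw [List.zip_append hlen, List.map_append]
    simp [ivs, fmtA_eq_yiFmt s x hsx]
  | y :: t, x, s, S, E, hlen, hsx, hpw => by
    obtain ⟨h1, h2⟩ := List.pairwise_cons.mp hpw
    have hxy : x ≤ y := h1 y (by simp)
    have hzip : (x :: y :: t).zip (y :: t) = (x, y) :: ((y :: t).zip t) := by simp
    have hlast : (x :: y :: t).getLast (List.cons_ne_nil _ _)
        = (y :: t).getLast (List.cons_ne_nil _ _) := List.getLast_cons _
    rw [hzip, List.foldl_cons, hlast]
    by_cases hgap : y - x > 1
    · have hstep : astep (S ++ [s], E) (x, y) = ((S ++ [s]) ++ [y], E ++ [x]) := by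
        simp [astep, hgap]
      rw [hstep, apH t y y (S ++ [s]) (E ++ [x]) (by simp [hlen]) le_rfl h2]
      rw [List.zip_append hlen, List.map_append]
      simp [ivs, hgap, fmtA_eq_yiFmt s x hsx]
    · have hstep : astep (S ++ [s], E) (x, y) = (S ++ [s], E) := by
        simp [astep, hgap]
      rw [hstep, apH t y s S E hlen (by omega) h2]
      rw [ivs, if_neg hgap]

lemma ivs_dsL : ∀ (t : List Int) (s p : Int), ivs s p t = ivs s p (dsL p t)
  | [], s, p => rfl
  | y :: t, s, p => by
    by_cases hy : y = p
    · subst hy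
      rw [dsL, if_pos rfl, ivs, if_neg (by omega)]
      exact ivs_dsL t s y
    · rw [dsL, if_neg hy, ivs, ivs]
      by_cases hgap : y - p > 1
      · rw [if_pos hgap, if_pos hgap, ivs_dsL t y y]
      · rw [if_neg hgap, if_neg hgap]
        exact ivs_dsL t s y

lemma ivs_eq_bIvs : ∀ (t : List Int) (s p : Int), (p :: t).Pairwise (· < ·) → ivs s p t = bIvs s p t
  | [], s, p, _ => rfl
  | y :: t, s, p, h => by
    have hpy : p < y := (List.pairwise_cons.mp h).1 y (by simp)
    have ht : (y :: t).Pairwise (· < ·) := (List.pairwise_cons.mp h).2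
    rw [ivs, bIvs]
    by_cases hy : y = p + 1
    · rw [if_neg (by omega), if_pos hy]
      exact ivs_eq_bIvs t s y (by omega ▸ ht)
    · rw [if_pos (by omega), if_neg hy]
      rw [ivs_eq_bIvs t y y ht]

lemma bIvs_eq_map_runsOf : ∀ (t : List Int) (s p : Int),
    bIvs s p t = (runsOf s p t).map (fun q => yiFmt q.1 q.2)
  | [], s, p => rfl
  | y :: t, s, p => by
    rw [bIvs, runsOf]
    by_cases hy : y = p + 1
    · rw [if_pos hy, if_pos hy]
      exact bIvs_eq_map_runsOf t s y
    · rw [if_neg hy, if_neg hy, List.map_cons, bIvs_eq_map_runsOf t y y]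

lemma dsL_gt : ∀ (t : List Int) (p : Int), (p :: t).Pairwise (· ≤ ·) → ∀ z ∈ dsL p t, p < z
  | [], p, _, z, hz => by simp [dsL] at hz
  | y :: t, p, h, z, hz => by
    obtain ⟨h1, h2⟩ := List.pairwise_cons.mp h
    have hpy : p ≤ y := h1 y (by simp)
    by_cases hy : y = p
    · rw [dsL, if_pos hy] at hz
      subst hy
      exact dsL_gt t y h2 z hz
    · rw [dsL, if_neg hy] at hz
      rcases List.mem_cons.mp hz with rfl | hz'
      · omega
      · have := dsL_gt t y h2 z hz'
        omega

lemma dsL_pairwise : ∀ (t : List Int) (p : Int), (p :: t).Pairwise (· ≤ ·) →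
    (p :: dsL p t).Pairwise (· < ·)
  | [], p, _ => by simp [dsL]
  | y :: t, p, h => by
    obtain ⟨h1, h2⟩ := List.pairwise_cons.mp h
    have hpt : (p :: t).Pairwise (· ≤ ·) := by
      refine List.pairwise_cons.mpr ⟨fun z hz => h1 z (by simp [hz]), (List.pairwise_cons.mp h2).2⟩
    by_cases hy : y = p
    · rw [dsL, if_pos hy]
      exact dsL_pairwise t p hpt
    · rw [dsL, if_neg hy]
      have hpy : p < y := lt_of_le_of_ne (h1 y (by simp)) (Ne.symm hy)
      have hrec := dsL_pairwise t y h2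
      refine List.pairwise_cons.mpr ⟨?_, hrec⟩
      intro z hz
      rcases List.mem_cons.mp hz with rfl | hz'
      · exact hpy
      · exact lt_trans hpy (dsL_gt t y h2 z hz')

lemma dsL_mem : ∀ (t : List Int) (p z : Int), (z ∈ p :: dsL p t ↔ z ∈ p :: t)
  | [], p, z => by simp [dsL]
  | y :: t, p, z => by
    by_cases hy : y = p
    · rw [dsL, if_pos hy]
      subst hy
      rw [dsL_mem t y z]
      simp
    · rw [dsL, if_neg hy]
      constructor
      · intro h
        rcases List.mem_cons.mp h with rfl | h'
        · simp
        · have := (dsL_mem t y z).mp (by simpa using h')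
          simp at this ⊢
          tauto
      · intro h
        rcases List.mem_cons.mp h with rfl | h'
        · simp
        · have := (dsL_mem t y z).mpr h'
          simp at this ⊢
          tauto

lemma sorted_set_eq (ys : List Int) (x : Int) (t : List Int)
    (h : PySem.List.sorted ys (fun x => x) false = x :: t) :
    PySem.List.sorted (PySem.Set.ofList ys) (fun x => x) false = x :: dsL x t := by
  have hpw : (x :: t).Pairwise (· ≤ ·) := by
    have := PySem.List.sorted_pairwise ys (fun x => x)
    rwa [h] at this
  have hlt : (x :: dsL x t).Pairwise (· < ·) := dsL_pairwise t x hpw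
  refine PySem.List.sorted_eq_of_perm_of_pairwise_lt _ _ _ ?_ hlt
  refine List.perm_of_nodup_nodup_toFinset_eq hlt.nodup (PySem.Set.nodup_ofList ys) ?_
  ext z
  simp only [List.mem_toFinset]
  rw [dsL_mem t x z, PySem.Set.mem_ofList]
  have hmem : ∀ w, w ∈ x :: t ↔ w ∈ ys := by
    intro w
    rw [← h, PySem.List.mem_sorted]
  exact hmem z

lemma apLen : ∀ (ps : List (Int × Int)) (S E : List Int), S.length = E.length + 1 →
    (ps.foldl astep (S, E)).1.length = (ps.foldl astep (S, E)).2.length + 1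
  | [], S, E, h => h
  | p :: ps, S, E, h => by
    rw [List.foldl_cons]
    unfold astep
    by_cases hg : p.2 - p.1 > 1
    · rw [if_pos hg]
      exact apLen ps _ _ (by simp [h])
    · rw [if_neg hg]
      exact apLen ps S E h

lemma getD_last (x : Int) (t : List Int) :
    (x :: t).getD t.length 0 = (x :: t).getLast (List.cons_ne_nil _ _) := by
  rw [List.getD_eq_getElem _ _ (by simp), List.getLast_eq_getElem]
  simp only [List.length_cons, Nat.add_sub_cancel]
  rfl

-- the dict fold groups a strictly increasing list into its consecutive runs
lemma dictLoop : ∀ (u : List Int) (i s p : Int) (front : List (Int × (Int × Int))),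
    (p :: u).Pairwise (· < ·) →
    (∀ q ∈ front, q.1 < p - i) →
    (front.map Prod.fst).Nodup →
    PySem.Dict.values ((PySem.List.enumerate u (i + 1)).foldl yiStep
        (PySem.Dict.mk (front ++ [(p - i, (s, p))])))
      = front.map Prod.snd ++ runsOf s p u
  | [], i, s, p, front, _, _, _ => by
    simp [PySem.List.enumerate_nil, runsOf, PySem.Dict.values]
  | y :: u, i, s, p, front, hpw, hfr, hnd => by
    obtain ⟨h1, h2⟩ := List.pairwise_cons.mp hpw
    have hpy : p < y := h1 y (by simp)
    rw [PySem.List.enumerate_cons, List.foldl_cons]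
    have hkeys : (PySem.Dict.mk (front ++ [(p - i, (s, p))])).keys
        = front.map Prod.fst ++ [p - i] := by
      simp [PySem.Dict.keys]
    have hndk : ((front.map Prod.fst) ++ [p - i]).Nodup := by
      refine List.Nodup.append hnd (List.nodup_singleton _) ?_
      intro a ha hb
      simp only [List.mem_singleton] at hb
      obtain ⟨q, hq, rfl⟩ := List.mem_map.mp ha
      exact absurd hb (hfr q hq).ne
    by_cases hy : y = p + 1
    · -- run continues: key y - (i+1) = p - i is present, pair updated in place
      have hkey : y - (i + 1) = p - i := by omega
      have hget : PySem.Dict.get? (PySem.Dict.mk (front ++ [(p - i, (s, p))])) (p - i)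
          = some (s, p) := by
        refine PySem.Dict.get?_of_mem_items _ (by simp) ?_
        rw [hkeys]; exact hndk
      have hstep : yiStep (PySem.Dict.mk (front ++ [(p - i, (s, p))])) (i + 1, y)
          = PySem.Dict.mk (front ++ [(p - i, (s, y))]) := by
        unfold yiStep
        rw [show ((i + 1, y) : Int × Int).2 - ((i + 1, y) : Int × Int).1 = p - i from hkey]
        rw [hget]
        apply PySem.Dict.ext
        have hcont : (PySem.Dict.mk (front ++ [(p - i, (s, p))])).contains (p - i) = true := by
          rw [PySem.Dict.contains_eq_isSome_get?, hget]; rfl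
        rw [PySem.Dict.items_insert_of_contains _ _ hcont]
        show (front ++ [(p - i, (s, p))]).map _ = _
        rw [List.map_append]
        have hfrm : front.map
            (fun q => if q.1 == (p - i) then ((p - i), (s, y)) else q) = front := by
          conv_rhs => rw [← List.map_id front]
          refine List.map_congr_left (fun q hq => ?_)
          have : (q.1 == (p - i)) = false := beq_eq_false_iff_ne.mpr (hfr q hq).ne
          simp [this]
        rw [hfrm]
        simp
      rw [hstep]
      have hrec := dictLoop u (i + 1) s y front
        h2 (fun q hq => by have := hfr q hq; omega) hnd
      rw [show p - i = y - (i + 1) from hkey.symm, hrec, runsOf, if_pos hy]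
    · -- gap: fresh key y - (i+1), a new run is appended
      have hgap : p - i < y - (i + 1) := by omega
      have hget : PySem.Dict.get? (PySem.Dict.mk (front ++ [(p - i, (s, p))])) (y - (i + 1))
          = none := by
        rw [PySem.Dict.get?_eq_none_iff_not_mem_keys, hkeys]
        intro hmem
        rcases List.mem_append.mp hmem with hl | hr
        · obtain ⟨q, hq, hqe⟩ := List.mem_map.mp hl
          have := hfr q hq
          omega
        · simp only [List.mem_singleton] at hr
          omega
      have hstep : yiStep (PySem.Dict.mk (front ++ [(p - i, (s, p))])) (i + 1, y)
          = PySem.Dict.mk ((front ++ [(p - i, (s, p))]) ++ [(y - (i + 1), (y, y))]) := by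
        unfold yiStep
        rw [show ((i + 1, y) : Int × Int).2 - ((i + 1, y) : Int × Int).1 = y - (i + 1) by
          simp]
        rw [hget]
        apply PySem.Dict.ext
        have hcont : (PySem.Dict.mk (front ++ [(p - i, (s, p))])).contains (y - (i + 1))
            = false := by
          rw [PySem.Dict.contains_eq_isSome_get?, hget]; rfl
        rw [PySem.Dict.items_insert_of_not_contains _ _ hcont]
      rw [hstep]
      have hrec := dictLoop u (i + 1) y y (front ++ [(p - i, (s, p))]) h2
        (fun q hq => by
          rcases List.mem_append.mp hq with hl | hr
          · have := hfr q hl; omega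
          · simp only [List.mem_singleton] at hr; subst hr; simpa using hgap)
        (by simpa using hndk)
      rw [hrec, runsOf, if_neg hy]
      simp

-- ===== VERDICT (by name: the statement is the Claim_ definition above) =====
theorem year_intervals_spec : Claim_equal_year_intervals := by
  intro ys _ hpre
  obtain ⟨x, t, hxt⟩ : ∃ x t, PySem.List.sorted ys (fun x => x) false = x :: t := by
    cases hsl : PySem.List.sorted ys (fun x => x) false with
    | nil => exact absurd ((PySem.List.sorted_eq_nil_iff _ _ _).mp hsl) hpre
    | cons a b => exact ⟨a, b, rfl⟩
  have hpw : (x :: t).Pairwise (· ≤ ·) := by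
    have := PySem.List.sorted_pairwise ys (fun x => x)
    rwa [hxt] at this
  have hA : year_intervals ys = PySem.Str.join "," (ivs x x t) := by
    unfold year_intervals
    rw [List.map_id', hxt]
    simp only []
    have h0 : PySem.List.pyGetD (x :: t) 0 0 = x := by
      simpa using PySem.List.pyGetD_natCast (x :: t) 0 0
    rw [h0]
    have hif : (if ((x :: t).length : Int) > 1 then
        (PySem.List.pyRange 0 (((x :: t).length : Int) - 1) 1).foldl
          (fun (se : List Int × List Int) i =>
            if PySem.List.pyGetD (x :: t) (i + 1) 0 - PySem.List.pyGetD (x :: t) i 0 > 1 then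
              (se.1 ++ [PySem.List.pyGetD (x :: t) (i + 1) 0], se.2 ++ [PySem.List.pyGetD (x :: t) i 0])
            else se) ([x], ([] : List Int))
      else ([x], ([] : List Int)))
        = ((x :: t).zip t).foldl astep ([x], []) := by
      have hadj := adjFold (fun st a b => if b - a > 1 then (st.1 ++ [b], st.2 ++ [a]) else st)
        0 (x :: t) ([x], [])
      cases t with
      | nil => simp
      | cons y t' =>
        rw [if_pos (by simp only [List.length_cons]; push_cast; omega)]
        rw [hadj]
        rfl
    rw [hif]
    have hlast : PySem.List.pyGetD (x :: t) (((x :: t).length : Int) - 1) 0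
        = (x :: t).getLast (List.cons_ne_nil _ _) := by
      have : (((x :: t).length : Int)) - 1 = ((t.length : Nat) : Int) := by simp
      rw [this, PySem.List.pyGetD_natCast, getD_last]
    rw [hlast]
    have hlen : (((x :: t).zip t).foldl astep ([x], [])).1.length
        = ((((x :: t).zip t).foldl astep ([x], [])).2
            ++ [(x :: t).getLast (List.cons_ne_nil _ _)]).length := by
      have := apLen (((x :: t).zip t)) [x] [] (by simp)
      simp [this]
    rw [zipFoldMap (fun s e => if e - s > 0 then PySem.Int.toStr s ++ "-" ++ PySem.Int.toStr e
          else PySem.Int.toStr s) 0 _ _ [] hlen]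
    have hap := apH t x x [] [] rfl le_rfl hpw
    simp only [List.nil_append, List.zip_nil_right] at hap ⊢
    rw [show (fun p : Int × Int => if p.2 - p.1 > 0 then
          PySem.Int.toStr p.1 ++ "-" ++ PySem.Int.toStr p.2 else PySem.Int.toStr p.1) = fmtA from rfl]
    rw [hap]
    simp
  have hB : year_intervals_alt ys
      = PySem.Str.join "," ((runsOf x x (dsL x t)).map (fun q => yiFmt q.1 q.2)) := by
    unfold year_intervals_alt
    rw [List.map_id', sorted_set_eq ys x t hxt]
    simp only []
    rw [PySem.List.enumerate_cons, List.foldl_cons]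
    have hstep0 : yiStep PySem.Dict.empty (0, x)
        = PySem.Dict.mk ([] ++ [(x - 0, (x, x))]) := by
      unfold yiStep
      simp only [PySem.Dict.get?_empty]
      rfl
    rw [show (0 : Int) + 1 = 0 + 1 from rfl, hstep0,
      dictLoop (dsL x t) 0 x x [] (dsL_pairwise t x hpw) (by simp) (by simp)]
    simp only [List.map_nil, List.nil_append]
    congr 1
  rw [Spec_year_intervals, hA, hB, ivs_dsL t x x,
    ivs_eq_bIvs (dsL x t) x x (dsL_pairwise t x hpw), bIvs_eq_map_runsOf]
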